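-- pv_equiv track=rewrite | github.com/hilltopcurry-star/agent50-supreme-web | memory_tracker.py | _errors_are_similar
-- ===== SOURCE A (Python) =====
-- def _errors_are_similar(error1: str, error2: str) -> bool:
--     """Check if two errors are similar"""
--     # Simple similarity check
--     error1_lower = error1.lower()
--     error2_lower = error2.lower()
--
--     # Check for common keywords
--     common_keywords = ["import", "module", "template", "bootstrap", "bp", "404", "405", "500"]
--
--     matching_keywords = 0
--     for keyword in common_keywords:
--         if keyword in error1_lower and keyword in error2_lower:
--             matching_keywords += 1
--
--     return matching_keywords >= 2
-- ===== SOURCE B (Python) =====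
-- def _errors_are_similar(error1: str, error2: str) -> bool:
--     """Early-exit recursion: succeed as soon as 2 shared keywords are found."""
--     a = error1.lower()
--     b = error2.lower()
--
--     def need(keywords, n):
--         # True iff at least n of `keywords` occur in both strings; stops early.
--         if n == 0:
--             return True
--         if not keywords:
--             return False
--         k, rest = keywords[0], keywords[1:]
--         if k in a and k in b:
--             return need(rest, n - 1)
--         return need(rest, n)
--
--     return need(["import", "module", "template", "bootstrap", "bp", "404", "405", "500"], 2)
-- ===== Notes on version B (the rewrite author's own statement) =====
-- stated objective: alternative
-- what changed: Replaces A's full counting loop over all keywords with an early-exit recursion carrying a 'matches still needed' counter that returns True as soon as 2 shared keywords are found, skipping the remaining containment tests.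
import Mathlib
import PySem

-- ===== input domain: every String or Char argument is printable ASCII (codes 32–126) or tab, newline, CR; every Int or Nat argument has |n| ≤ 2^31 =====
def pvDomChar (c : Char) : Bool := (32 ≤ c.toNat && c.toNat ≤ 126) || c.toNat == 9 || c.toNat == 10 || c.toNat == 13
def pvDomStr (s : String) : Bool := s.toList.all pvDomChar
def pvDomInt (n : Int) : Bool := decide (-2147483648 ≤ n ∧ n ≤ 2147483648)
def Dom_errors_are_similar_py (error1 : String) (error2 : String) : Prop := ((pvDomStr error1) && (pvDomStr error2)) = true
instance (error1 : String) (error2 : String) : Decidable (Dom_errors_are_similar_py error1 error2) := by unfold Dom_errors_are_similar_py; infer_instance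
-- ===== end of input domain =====

-- B replaces A's full counting loop with an early-exit recursion carrying a 'matches still
-- needed' counter that returns True as soon as 2 shared keywords are found (alternative; same cost).

-- ===== PORT A =====
-- literal port of A: one loop over the keyword list incrementing a counter
def errors_are_similar_py (error1 : String) (error2 : String) : Bool :=
  let error1_lower := PySem.Str.lower error1
  let error2_lower := PySem.Str.lower error2
  let common_keywords : List String := ["import", "module", "template", "bootstrap", "bp", "404", "405", "500"]
  let matching_keywords : Int :=
    common_keywords.foldl
      (fun acc keyword =>
        if PySem.Str.isIn keyword error1_lower && PySem.Str.isIn keyword error2_lower then acc + 1 else acc)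
      0
  decide (matching_keywords ≥ 2)

-- ===== PORT B =====
-- literal port of B's inner `need`: recursion on the keyword list with the remaining-match count
def pvNeed (p : String → Bool) : List String → Nat → Bool
  | _, 0 => true
  | [], _ + 1 => false
  | k :: rest, n + 1 => if p k then pvNeed p rest n else pvNeed p rest (n + 1)

def errors_are_similar_py_alt (error1 : String) (error2 : String) : Bool :=
  let a := PySem.Str.lower error1
  let b := PySem.Str.lower error2
  pvNeed (fun k => PySem.Str.isIn k a && PySem.Str.isIn k b)
    ["import", "module", "template", "bootstrap", "bp", "404", "405", "500"] 2

-- ===== PRECONDITION & SPEC =====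
def Spec_errors_are_similar_py (error1 : String) (error2 : String) (out : Bool) : Prop := out = errors_are_similar_py_alt error1 error2
instance (error1 : String) (error2 : String) (out : Bool) : Decidable (Spec_errors_are_similar_py error1 error2 out) := by unfold Spec_errors_are_similar_py; infer_instance

-- ===== CLAIM =====
def Claim_equal_errors_are_similar_py : Prop := ∀ (error1 : String) (error2 : String), Dom_errors_are_similar_py error1 error2 → Spec_errors_are_similar_py error1 error2 (errors_are_similar_py error1 error2)

-- ===== LEMMAS AND PROOFS =====

-- A's counter loop counts exactly the keywords that pass the test
theorem pv_foldl_count (r : String → Bool) (l : List String) (n : Int) :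
    l.foldl (fun acc k => if r k then acc + 1 else acc) n = n + (l.filter r).length := by
  induction l generalizing n with
  | nil => simp
  | cons x t ih =>
    by_cases h : r x = true
    · simp [List.foldl_cons, h, ih]; omega
    · simp [List.foldl_cons, h, ih]

-- B's early-exit recursion succeeds iff at least n keywords pass the test
theorem pv_need_eq (p : String → Bool) (l : List String) (n : Nat) :
    pvNeed p l n = decide (n ≤ (l.filter p).length) := by
  induction l generalizing n with
  | nil => cases n <;> simp [pvNeed]
  | cons x t ih =>
    cases n with
    | zero => simp [pvNeed]
    | succ m =>
      by_cases h : p x = true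
      · simp [pvNeed, h, ih]
      · simp [pvNeed, h, ih]

-- ===== VERDICT =====
theorem errors_are_similar_py_spec : Claim_equal_errors_are_similar_py := by
  intro error1 error2 _
  unfold Spec_errors_are_similar_py errors_are_similar_py errors_are_similar_py_alt
  simp only []
  rw [pv_foldl_count, pv_need_eq]
  simp only [zero_add]
  congr 1
  rw [eq_iff_iff]
  omega
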